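-- pv_equiv track=rewrite | github.com/samliangsk/RED-Loss-Model | bursty-plot.py | build_active_flows_time_series
-- ===== SOURCE A (Python) =====
-- def build_active_flows_time_series(events):
--     # Returns lists of times and active_counts suitable for step plotting
--     times = []
--     active_counts = []
--     current_active = 0
--
--     if not events:
--         return [], []
--
--     for event in events:
--         time, delta = event
--
--         if times and time == times[-1]:
--             # Same timestamp, update active_counts
--             current_active += delta
--             active_counts[-1] = current_active
--         else:
--             # Add previous state
--             if times:
--                 times.append(time)
--                 active_counts.append(current_active)
--             # Update state
--             current_active += delta
--             times.append(time)
--             active_counts.append(current_active)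
--
--     return times, active_counts
-- ===== SOURCE B (Python) =====
-- def build_active_flows_time_series(events):
--     # Two passes: collapse runs of consecutive equal timestamps into
--     # (time, total_delta) groups, then emit step-plot points with a
--     # running cumulative count.
--     if not events:
--         return [], []
--
--     groups = []
--     for event in events:
--         time, delta = event
--         if groups and groups[-1][0] == time:
--             groups[-1] = (time, groups[-1][1] + delta)
--         else:
--             groups.append((time, delta))
--
--     times = []
--     active_counts = []
--     cumulative = 0
--     first = True
--     for time, total in groups:
--         if first:
--             cumulative += total
--             times.append(time)
--             active_counts.append(cumulative)
--             first = False
--         else: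
--             times.append(time)
--             active_counts.append(cumulative)
--             cumulative += total
--             times.append(time)
--             active_counts.append(cumulative)
--     return times, active_counts
-- ===== Notes on version B (the rewrite author's own statement) =====
-- stated objective: alternative
-- what changed: Replaces A's single loop that mutates the tail of the output lists in place with a two-pass decomposition: first collapse runs of consecutive equal timestamps into (time, total_delta) groups, then emit the step-plot points from the groups with a running cumulative count and no in-place updates.
import Mathlib
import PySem

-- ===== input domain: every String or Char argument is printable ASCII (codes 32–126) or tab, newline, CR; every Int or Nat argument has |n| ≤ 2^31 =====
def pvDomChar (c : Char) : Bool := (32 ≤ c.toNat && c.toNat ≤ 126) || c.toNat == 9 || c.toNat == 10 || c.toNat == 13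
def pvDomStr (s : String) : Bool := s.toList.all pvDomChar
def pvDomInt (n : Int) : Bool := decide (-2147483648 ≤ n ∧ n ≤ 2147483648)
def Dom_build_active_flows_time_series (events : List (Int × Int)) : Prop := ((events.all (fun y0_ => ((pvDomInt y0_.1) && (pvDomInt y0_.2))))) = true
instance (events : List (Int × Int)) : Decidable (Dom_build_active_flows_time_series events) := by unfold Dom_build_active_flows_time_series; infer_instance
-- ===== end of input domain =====

-- B collapses runs of consecutive equal timestamps into (time, total) groups first,
-- then emits the step-plot points from the groups with a running cumulative count
-- (objective: alternative decomposition, same O(n) cost).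

-- ===== PORT A =====
-- one loop iteration of A: state = (times, active_counts, current_active)
def pvStepA (st : List Int × List Int × Int) (ev : Int × Int) : List Int × List Int × Int :=
  let (times, counts, cur) := st
  let (t, d) := ev
  if times ≠ [] ∧ t = times.getLast! then
    -- active_counts[-1] = current_active
    (times, counts.dropLast ++ [cur + d], cur + d)
  else
    let (times1, counts1) := if times ≠ [] then (times ++ [t], counts ++ [cur]) else (times, counts)
    (times1 ++ [t], counts1 ++ [cur + d], cur + d)

def build_active_flows_time_series (events : List (Int × Int)) : List Int × List Int :=
  if events = [] then ([], [])
  else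
    let st := events.foldl pvStepA ([], [], 0)
    (st.1, st.2.1)

-- ===== PORT B =====
-- pass 1 of B: collapse a run of consecutive equal timestamps into its last group
def pvStepGroup (groups : List (Int × Int)) (ev : Int × Int) : List (Int × Int) :=
  let (t, d) := ev
  if groups ≠ [] ∧ (groups.getLast!).1 = t then
    groups.dropLast ++ [(t, (groups.getLast!).2 + d)]
  else
    groups ++ [(t, d)]

-- pass 2 of B: state = (times, active_counts, cumulative, first)
def pvStepB (st : List Int × List Int × Int × Bool) (g : Int × Int) : List Int × List Int × Int × Bool :=
  let (times, counts, cum, first) := st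
  let (t, d) := g
  if first then
    (times ++ [t], counts ++ [cum + d], cum + d, false)
  else
    (times ++ [t, t], counts ++ [cum, cum + d], cum + d, false)

def build_active_flows_time_series_alt (events : List (Int × Int)) : List Int × List Int :=
  if events = [] then ([], [])
  else
    let groups := events.foldl pvStepGroup []
    let st := groups.foldl pvStepB ([], [], 0, true)
    (st.1, st.2.1)

-- ===== PRECONDITION & SPEC =====
def Spec_build_active_flows_time_series (events : List (Int × Int)) (out : List Int × List Int) : Prop := out = build_active_flows_time_series_alt events
instance (events : List (Int × Int)) (out : List Int × List Int) : Decidable (Spec_build_active_flows_time_series events out) := by unfold Spec_build_active_flows_time_series; infer_instance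

-- ===== CLAIM (what is proved, stated in full; the proofs are below) =====
def Claim_equal_build_active_flows_time_series : Prop := ∀ (events : List (Int × Int)), Dom_build_active_flows_time_series events → Spec_build_active_flows_time_series events (build_active_flows_time_series events)

-- ===== LEMMAS AND PROOFS =====

-- abstract description of A's loop on the suffix of events, given the current last
-- time t0, last count lastc and running count cur; returns the (times, counts) suffix
-- starting at the mutable last element
def pvH (t0 lastc cur : Int) : List (Int × Int) → List Int × List Int
  | [] => ([t0], [lastc])
  | (t, d) :: rest =>
    if t = t0 then pvH t0 (cur + d) (cur + d) rest
    else
      let p := pvH t (cur + d) (cur + d) rest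
      (t0 :: t :: p.1, lastc :: cur :: p.2)

-- abstract description of B's grouping pass on a suffix, given the open run (t0, s0)
def pvG (t0 s0 : Int) : List (Int × Int) → List (Int × Int)
  | [] => [(t0, s0)]
  | (t, d) :: rest =>
    if t = t0 then pvG t0 (s0 + d) rest
    else (t0, s0) :: pvG t d rest

-- abstract description of B's emitting pass after the first group
def pvK (cum : Int) : List (Int × Int) → List Int × List Int
  | [] => ([], [])
  | (t, d) :: rest =>
    let p := pvK (cum + d) rest
    (t :: t :: p.1, cum :: (cum + d) :: p.2)

-- what both sides compute: head group, then pvK over the remaining groups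
def pvAsm (base : Int) : List (Int × Int) → List Int × List Int
  | [] => ([], [])
  | (t, s) :: grest => (t :: (pvK (base + s) grest).1, (base + s) :: (pvK (base + s) grest).2)

theorem pv_lemA (events : List (Int × Int)) :
    ∀ (ts cs : List Int) (t0 lastc cur : Int),
      ((events.foldl pvStepA (ts ++ [t0], cs ++ [lastc], cur)).1,
       (events.foldl pvStepA (ts ++ [t0], cs ++ [lastc], cur)).2.1)
      = (ts ++ (pvH t0 lastc cur events).1, cs ++ (pvH t0 lastc cur events).2) := by
  induction events with
  | nil => intro ts cs t0 lastc cur; simp [pvH]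
  | cons ev rest ih =>
    intro ts cs t0 lastc cur
    obtain ⟨t, d⟩ := ev
    by_cases h : t = t0
    · have hstep : pvStepA (ts ++ [t0], cs ++ [lastc], cur) (t, d)
          = (ts ++ [t0], cs ++ [cur + d], cur + d) := by
        simp [pvStepA, h]
      have hH : pvH t0 lastc cur ((t, d) :: rest) = pvH t0 (cur + d) (cur + d) rest := by
        simp [pvH, h]
      rw [List.foldl_cons, hstep, hH]
      exact ih ts cs t0 (cur + d) (cur + d)
    · have hstep : pvStepA (ts ++ [t0], cs ++ [lastc], cur) (t, d)
          = ((ts ++ [t0, t]) ++ [t], (cs ++ [lastc, cur]) ++ [cur + d], cur + d) := by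
        simp [pvStepA, h]
      have hH : pvH t0 lastc cur ((t, d) :: rest)
          = (t0 :: t :: (pvH t (cur + d) (cur + d) rest).1,
             lastc :: cur :: (pvH t (cur + d) (cur + d) rest).2) := by
        simp [pvH, h]
      rw [List.foldl_cons, hstep, hH, ih (ts ++ [t0, t]) (cs ++ [lastc, cur]) t (cur + d) (cur + d)]
      simp

theorem pv_lemG (events : List (Int × Int)) :
    ∀ (gs : List (Int × Int)) (t0 s0 : Int),
      events.foldl pvStepGroup (gs ++ [(t0, s0)]) = gs ++ pvG t0 s0 events := by
  induction events with
  | nil => intro gs t0 s0; simp [pvG]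
  | cons ev rest ih =>
    intro gs t0 s0
    obtain ⟨t, d⟩ := ev
    by_cases h : t = t0
    · have hstep : pvStepGroup (gs ++ [(t0, s0)]) (t, d) = gs ++ [(t0, s0 + d)] := by
        simp [pvStepGroup, h]
      have hG : pvG t0 s0 ((t, d) :: rest) = pvG t0 (s0 + d) rest := by
        simp [pvG, h]
      rw [List.foldl_cons, hstep, hG]
      exact ih gs t0 (s0 + d)
    · have h' : ¬ t0 = t := fun e => h e.symm
      have hstep : pvStepGroup (gs ++ [(t0, s0)]) (t, d) = (gs ++ [(t0, s0)]) ++ [(t, d)] := by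
        simp [pvStepGroup, h']
      have hG : pvG t0 s0 ((t, d) :: rest) = (t0, s0) :: pvG t d rest := by
        simp [pvG, h]
      rw [List.foldl_cons, hstep, hG, ih (gs ++ [(t0, s0)]) t d]
      simp

theorem pv_lemB (groups : List (Int × Int)) :
    ∀ (ts cs : List Int) (cum : Int),
      ((groups.foldl pvStepB (ts, cs, cum, false)).1,
       (groups.foldl pvStepB (ts, cs, cum, false)).2.1)
      = (ts ++ (pvK cum groups).1, cs ++ (pvK cum groups).2) := by
  induction groups with
  | nil => intro ts cs cum; simp [pvK]
  | cons g rest ih =>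
    intro ts cs cum
    obtain ⟨t, d⟩ := g
    have hstep : pvStepB (ts, cs, cum, false) (t, d)
        = (ts ++ [t, t], cs ++ [cum, cum + d], cum + d, false) := by
      simp [pvStepB]
    simp only [List.foldl_cons, hstep, pvK]
    rw [ih (ts ++ [t, t]) (cs ++ [cum, cum + d]) (cum + d)]
    simp

theorem pv_headG (events : List (Int × Int)) :
    ∀ (t0 s0 : Int), ∃ S grest, pvG t0 s0 events = (t0, S) :: grest := by
  induction events with
  | nil => intro t0 s0; exact ⟨s0, [], rfl⟩
  | cons ev rest ih =>
    intro t0 s0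
    obtain ⟨t, d⟩ := ev
    by_cases h : t = t0
    · subst h; simpa [pvG] using ih t (s0 + d)
    · exact ⟨s0, pvG t d rest, by simp [pvG, h]⟩

theorem pv_bridge (events : List (Int × Int)) :
    ∀ (t0 s0 base : Int),
      pvH t0 (base + s0) (base + s0) events = pvAsm base (pvG t0 s0 events) := by
  induction events with
  | nil => intro t0 s0 base; simp [pvH, pvG, pvAsm, pvK]
  | cons ev rest ih =>
    intro t0 s0 base
    obtain ⟨t, d⟩ := ev
    by_cases h : t = t0
    · have hH : pvH t0 (base + s0) (base + s0) ((t, d) :: rest)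
          = pvH t0 (base + s0 + d) (base + s0 + d) rest := by
        simp [pvH, h]
      have hG : pvG t0 s0 ((t, d) :: rest) = pvG t0 (s0 + d) rest := by
        simp [pvG, h]
      rw [hH, hG, show base + s0 + d = base + (s0 + d) from by ring]
      exact ih t0 (s0 + d) base
    · obtain ⟨S, grest, hhead⟩ := pv_headG rest t d
      have hH : pvH t0 (base + s0) (base + s0) ((t, d) :: rest)
          = (t0 :: t :: (pvH t (base + s0 + d) (base + s0 + d) rest).1,
             (base + s0) :: (base + s0) :: (pvH t (base + s0 + d) (base + s0 + d) rest).2) := by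
        simp [pvH, h]
      have hG : pvG t0 s0 ((t, d) :: rest) = (t0, s0) :: pvG t d rest := by
        simp [pvG, h]
      have hrec : pvH t (base + s0 + d) (base + s0 + d) rest
          = pvAsm (base + s0) (pvG t d rest) := by
        have := ih t d (base + s0)
        rw [show base + s0 + d = (base + s0) + d from rfl]
        exact this
      rw [hH, hG, hrec, hhead]
      simp [pvAsm, pvK, add_assoc]

theorem pv_A_char (t : Int) (d : Int) (rest : List (Int × Int)) :
    build_active_flows_time_series ((t, d) :: rest) = pvAsm 0 (pvG t d rest) := by
  have hne : ¬((t, d) :: rest = ([] : List (Int × Int))) := by simp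
  have hstep : pvStepA ([], [], 0) (t, d) = (([] : List Int) ++ [t], ([] : List Int) ++ [0 + d], 0 + d) := by
    simp [pvStepA]
  have hA := pv_lemA rest [] [] t (0 + d) (0 + d)
  have hb := pv_bridge rest t d 0
  simp only [build_active_flows_time_series, if_neg hne, List.foldl_cons, hstep]
  rw [show ((rest.foldl pvStepA (([] : List Int) ++ [t], ([] : List Int) ++ [0 + d], 0 + d)).1,
       (rest.foldl pvStepA (([] : List Int) ++ [t], ([] : List Int) ++ [0 + d], 0 + d)).2.1)
      = pvAsm 0 (pvG t d rest) from by rw [hA, hb]; simp]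

theorem pv_B_char (t : Int) (d : Int) (rest : List (Int × Int)) :
    build_active_flows_time_series_alt ((t, d) :: rest) = pvAsm 0 (pvG t d rest) := by
  have hne : ¬((t, d) :: rest = ([] : List (Int × Int))) := by simp
  have hg1 : pvStepGroup [] (t, d) = ([] : List (Int × Int)) ++ [(t, d)] := by
    simp [pvStepGroup]
  have hG : rest.foldl pvStepGroup (([] : List (Int × Int)) ++ [(t, d)]) = pvG t d rest := by
    simpa using pv_lemG rest [] t d
  obtain ⟨S, grest, hhead⟩ := pv_headG rest t d
  have hb1 : pvStepB ([], [], 0, true) (t, S) = (([] : List Int) ++ [t], ([] : List Int) ++ [0 + S], 0 + S, false) := by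
    simp [pvStepB]
  have hB := pv_lemB grest ([] ++ [t]) ([] ++ [0 + S]) (0 + S)
  simp only [build_active_flows_time_series_alt, if_neg hne, List.foldl_cons, hg1, hG, hhead,
    hb1, pvAsm]
  rw [hB]
  simp

-- ===== VERDICT (by name: the statement is the Claim_ definition above) =====
theorem build_active_flows_time_series_spec : Claim_equal_build_active_flows_time_series := by
  intro events _
  unfold Spec_build_active_flows_time_series
  cases events with
  | nil => rfl
  | cons ev rest =>
    obtain ⟨t, d⟩ := ev
    rw [pv_A_char, pv_B_char]
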